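-- pv_equiv track=rewrite | github.com/hikowong/taxomanie | trunk/src/lib/phylogelib.py | removeBootStraps
-- ===== SOURCE A (Python) =====
-- def removeBootStraps(tree):
--   """ Remove all bootstraps from tree """
--   chaine = ""
--   ignore = False
--   for i in tree:
--     if i == ":":
--       ignore = True
--     if i == "," or i == ")":
--       ignore = False
--     if not ignore:
--       chaine += i
--   return chaine
-- ===== SOURCE B (Python) =====
-- def removeBootStraps(tree):
--   """ Remove all bootstraps from tree """
--   out = []
--   i = 0
--   n = len(tree)
--   while i < n:
--     c = tree[i]
--     if c == ":":
--       i += 1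
--       while i < n and tree[i] != "," and tree[i] != ")":
--         i += 1
--     else:
--       out.append(c)
--       i += 1
--   return "".join(out)
-- ===== Notes on version B (the rewrite author's own statement) =====
-- stated objective: alternative
-- what changed: Replaces the boolean ignore-flag state machine that tests every character against three conditions with a skip-ahead scanner: when a colon is seen an inner loop advances the index past the bootstrap value to the next delimiter, and kept characters are collected in a list joined once at the end.
import Mathlib
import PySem

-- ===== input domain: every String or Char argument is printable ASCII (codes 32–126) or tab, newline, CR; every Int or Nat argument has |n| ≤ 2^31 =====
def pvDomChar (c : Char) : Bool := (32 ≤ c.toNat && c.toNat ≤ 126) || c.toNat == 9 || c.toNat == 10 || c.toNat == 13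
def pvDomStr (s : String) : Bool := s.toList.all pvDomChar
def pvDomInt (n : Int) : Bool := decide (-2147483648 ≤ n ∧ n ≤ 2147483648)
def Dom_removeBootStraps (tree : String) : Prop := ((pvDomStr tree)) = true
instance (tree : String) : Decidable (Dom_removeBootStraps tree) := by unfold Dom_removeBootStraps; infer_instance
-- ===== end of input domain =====

-- B replaces A's ignore-flag state machine with a skip-ahead scanner (on ':' jump to the
-- next ',' or ')'), collecting kept characters and joining once; same O(n) cost.

-- ===== PORT A =====
-- state = (chaine, ignore); the three ifs of A's loop body, in order
def pvAStep (st : List Char × Bool) (i : Char) : List Char × Bool :=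
  let ig1 := if i = ':' then true else st.2
  let ig2 := if i = ',' ∨ i = ')' then false else ig1
  (if ig2 then st.1 else st.1 ++ [i], ig2)

def removeBootStraps (tree : String) : String :=
  String.ofList (tree.toList.foldl pvAStep ([], false)).1

-- ===== PORT B =====
-- the inner while loop of Source B ('advance i past non-delimiters') is List.dropWhile
def pvBGo : List Char → List Char
  | [] => []
  | c :: rest =>
    if c = ':' then pvBGo (rest.dropWhile (fun d => !(d == ',' || d == ')')))
    else c :: pvBGo rest
termination_by l => l.length
decreasing_by
  · simp only [List.length_cons]
    exact Nat.lt_succ_of_le (List.length_dropWhile_le _ _)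
  · simp only [List.length_cons]
    omega

def removeBootStraps_alt (tree : String) : String :=
  String.ofList (pvBGo tree.toList)

-- ===== PRECONDITION & SPEC =====
def Spec_removeBootStraps (tree : String) (out : String) : Prop := out = removeBootStraps_alt tree
instance (tree : String) (out : String) : Decidable (Spec_removeBootStraps tree out) := by unfold Spec_removeBootStraps; infer_instance

-- ===== CLAIM (what is proved, stated in full; the proofs are below) =====
def Claim_equal_removeBootStraps : Prop := ∀ (tree : String), Dom_removeBootStraps tree → Spec_removeBootStraps tree (removeBootStraps tree)

-- ===== LEMMAS AND PROOFS =====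

-- while ignoring, non-delimiter characters change nothing
lemma pvA_skip (l : List Char) (acc : List Char) :
    List.foldl pvAStep (acc, true) l
      = List.foldl pvAStep (acc, true) (l.dropWhile (fun d => !(d == ',' || d == ')'))) := by
  induction l with
  | nil => rfl
  | cons c rest ih =>
    rw [List.dropWhile_cons]
    by_cases h : (!(c == ',' || c == ')')) = true
    · rw [if_pos h]
      have hc : ¬ (c = ',' ∨ c = ')') := by
        simp only [Bool.not_eq_eq_eq_not, Bool.not_true, Bool.or_eq_false_iff, beq_eq_false_iff_ne] at h
        tauto
      have hstep : pvAStep (acc, true) c = (acc, true) := by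
        simp [pvAStep, hc]
      simp only [List.foldl_cons, hstep]
      exact ih
    · rw [if_neg h]

-- head of the dropped suffix is a delimiter
lemma pvDrop_head (l : List Char) (d : Char) (t : List Char)
    (h : l.dropWhile (fun d => !(d == ',' || d == ')')) = d :: t) :
    d = ',' ∨ d = ')' := by
  induction l with
  | nil => simp at h
  | cons c rest ih =>
    rw [List.dropWhile_cons] at h
    by_cases hc : (!(c == ',' || c == ')')) = true
    · rw [if_pos hc] at h
      exact ih h
    · rw [if_neg hc] at h
      have hb : (c == ',' || c == ')') = true := by
        cases hx : (c == ',' || c == ')') with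
        | false => exact absurd (by simp [hx]) hc
        | true => rfl
      injection h with h1 h2
      subst h1
      simpa using hb

lemma pvBGo_colon (rest : List Char) :
    pvBGo (':' :: rest) = pvBGo (rest.dropWhile (fun d => !(d == ',' || d == ')'))) := by
  simp [pvBGo]

lemma pvMain (l : List Char) : ∀ acc : List Char,
    (List.foldl pvAStep (acc, false) l).1 = acc ++ pvBGo l := by
  induction l using pvBGo.induct with
  | case1 => intro acc; simp [pvBGo]
  | case2 rest ih =>
    intro acc
    have hstep : pvAStep (acc, false) ':' = (acc, true) := by
      simp [pvAStep]
    simp only [List.foldl_cons, hstep]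
    rw [pvA_skip rest acc, pvBGo_colon]
    rcases hd : rest.dropWhile (fun d => !(d == ',' || d == ')')) with _ | ⟨d, t⟩
    · simp [pvBGo]
    · have hdelim : d = ',' ∨ d = ')' := pvDrop_head rest d t hd
      have hstep2 : pvAStep (acc, true) d = (acc ++ [d], false) := by
        simp [pvAStep, hdelim]
      have hstep3 : pvAStep (acc, false) d = (acc ++ [d], false) := by
        simp [pvAStep, hdelim]
      rw [hd] at ih
      simp only [List.foldl_cons, hstep2]
      have hx := ih acc
      simp only [List.foldl_cons, hstep3] at hx
      exact hx
  | case3 c rest hne ih =>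
    intro acc
    have hstep : pvAStep (acc, false) c = (acc ++ [c], false) := by
      simp [pvAStep, hne]
    simp only [List.foldl_cons, hstep]
    rw [ih (acc ++ [c])]
    simp [pvBGo, hne]

-- ===== VERDICT (by name: the statement is the Claim_ definition above) =====
theorem removeBootStraps_spec : Claim_equal_removeBootStraps := by
  intro tree _
  unfold Spec_removeBootStraps removeBootStraps removeBootStraps_alt
  rw [pvMain tree.toList []]
  rfl
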